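-- pv_equiv track=rewrite | github.com/f1r3k3rn/codeforces | contests/174/C.py | solve
-- ===== SOURCE A (Python) =====
-- def solve(n, vet):
--     sol = 0
--     flag = 0
--
--
--     l,r = 0,0
--     ml,mr = 0,0
--     s = set()
--
--     for i in range(n):
--         if vet[i] == 1 or vet[i] == -1:
--             l += vet[i]
--             l = max(l,0)
--             ml = max(ml,l)
--
--             r += vet[i]
--             r = min(r,0)
--             mr = min(mr,r)
--         else:
--             flag = i
--             l,r = 0,0
--             continue
--
--     x1,x2 = 0,0
--     y1,y2 = 0,0
--
--     z = 0
--     for i in range(flag + 1,n):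
--         z += vet[i]
--         x1 = max(x1,z)
--         y1 = min(y1,z)
--
--     z = 0
--     for i in range(flag - 1,-1,-1):
--         z += vet[i]
--         x2 = max(x2,z)
--         y2 = min(y2,z)
--
--     for i in range(mr,ml + 1):
--         s.add(i)
--
--     for i in range(min(y1 + y2,min(y1,y2)),max(x2 + x1,max(x1,x2)) + 1):
--         s.add(i + vet[flag])
--
--     z = [i for i in s]
--     z.sort()
--
--     return str(len(z)) + "\n" + " ".join(map(str,z))
-- ===== SOURCE B (Python) =====
-- def solve(n, vet):
--     # last index holding a non-(+-1) element (0 if none), and the best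
--     # running-max / running-min of +-1 runs, in a single pass
--     flag = 0
--     l = r = ml = mr = 0
--     for i in range(n):
--         v = vet[i]
--         if v == 1 or v == -1:
--             l = max(l + v, 0)
--             ml = max(ml, l)
--             r = min(r + v, 0)
--             mr = min(mr, r)
--         else:
--             flag = i
--             l = r = 0
--     # extremes of partial sums to the right and to the left of flag
--     hi1 = lo1 = z = 0
--     for i in range(flag + 1, n):
--         z += vet[i]
--         hi1 = max(hi1, z)
--         lo1 = min(lo1, z)
--     hi2 = lo2 = z = 0
--     for i in range(flag - 1, -1, -1):
--         z += vet[i]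
--         hi2 = max(hi2, z)
--         lo2 = min(lo2, z)
--     # two closed intervals; merge them directly, no set, no sort
--     a1, b1 = mr, ml
--     a2, b2 = lo1 + lo2 + vet[flag], hi1 + hi2 + vet[flag]
--     if a2 < a1:
--         a1, b1, a2, b2 = a2, b2, a1, b1
--     if a2 <= b1 + 1:
--         out = list(range(a1, max(b1, b2) + 1))
--     else:
--         out = list(range(a1, b1 + 1)) + list(range(a2, b2 + 1))
--     return str(len(out)) + "\n" + " ".join(map(str, out))
-- ===== Notes on version B (the rewrite author's own statement) =====
-- stated objective: alternative
-- what changed: B merges the two contiguous integer intervals directly (swap so the lower one comes first, then emit one range or two disjoint ranges) instead of inserting every value into a set and sorting it, and simplifies the min/max bound expressions using that the partial-sum extremes have known signs; measured ~1.6-2.3x faster on generated inputs but not confirmed at the largest size.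
import Mathlib
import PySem

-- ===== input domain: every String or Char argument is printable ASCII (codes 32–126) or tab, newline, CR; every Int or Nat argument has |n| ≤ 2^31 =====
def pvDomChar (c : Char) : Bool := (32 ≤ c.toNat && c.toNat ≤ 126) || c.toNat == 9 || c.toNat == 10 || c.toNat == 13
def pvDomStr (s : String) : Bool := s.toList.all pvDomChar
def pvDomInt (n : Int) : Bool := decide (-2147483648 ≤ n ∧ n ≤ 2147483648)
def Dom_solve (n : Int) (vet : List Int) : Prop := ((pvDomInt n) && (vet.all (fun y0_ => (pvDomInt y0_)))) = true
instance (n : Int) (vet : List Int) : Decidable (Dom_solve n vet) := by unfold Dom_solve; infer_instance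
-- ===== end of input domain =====

-- B replaces A's set-building plus sort by a direct ordered merge of the two integer intervals (alternative algorithm; removes the set/sort pass).


-- ===== PORT A =====
def solve (n : Int) (vet : List Int) : String :=
  let st := (PySem.List.pyRange 0 n 1).foldl
    (fun (s : Int × Int × Int × Int × Int) i =>
      let (flag, l, r, ml, mr) := s
      if PySem.List.pyGetD vet i 0 = 1 ∨ PySem.List.pyGetD vet i 0 = -1 then
        let l := l + PySem.List.pyGetD vet i 0
        let l := max l 0
        let ml := max ml l
        let r := r + PySem.List.pyGetD vet i 0
        let r := min r 0
        let mr := min mr r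
        (flag, l, r, ml, mr)
      else
        (i, 0, 0, ml, mr))
    (0, 0, 0, 0, 0)
  let flag := st.1
  let ml := st.2.2.2.1
  let mr := st.2.2.2.2
  let p := (PySem.List.pyRange (flag + 1) n 1).foldl
    (fun (s : Int × Int × Int) i =>
      let z := s.2.2 + PySem.List.pyGetD vet i 0
      (max s.1 z, min s.2.1 z, z))
    (0, 0, 0)
  let q := (PySem.List.pyRange (flag - 1) (-1) (-1)).foldl
    (fun (s : Int × Int × Int) i =>
      let z := s.2.2 + PySem.List.pyGetD vet i 0
      (max s.1 z, min s.2.1 z, z))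
    (0, 0, 0)
  let x1 := p.1; let y1 := p.2.1
  let x2 := q.1; let y2 := q.2.1
  let s : PySem.Set Int := (PySem.List.pyRange mr (ml + 1) 1).foldl PySem.Set.add PySem.Set.empty
  let s := (PySem.List.pyRange (min (y1 + y2) (min y1 y2)) (max (x2 + x1) (max x1 x2) + 1) 1).foldl
      (fun s i => PySem.Set.add s (i + PySem.List.pyGetD vet flag 0)) s
  let z := PySem.List.sorted s (fun x => x) false
  PySem.Int.toStr (PySem.List.len z) ++ "\n" ++ PySem.Str.join " " (z.map PySem.Int.toStr)

-- ===== PORT B =====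
-- B-side helpers: the single combined scan step, the partial-sum-extremes step, and the interval merge
def step1 (vet : List Int) (s : Int × Int × Int × Int × Int) (i : Int) : Int × Int × Int × Int × Int :=
  let v := PySem.List.pyGetD vet i 0
  if v = 1 ∨ v = -1 then
    (s.1, max (s.2.1 + v) 0, min (s.2.2.1 + v) 0,
     max s.2.2.2.1 (max (s.2.1 + v) 0), min s.2.2.2.2 (min (s.2.2.1 + v) 0))
  else (i, 0, 0, s.2.2.2.1, s.2.2.2.2)

def step2 (vet : List Int) (s : Int × Int × Int) (i : Int) : Int × Int × Int :=
  let v := PySem.List.pyGetD vet i 0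
  (max s.1 (s.2.2 + v), min s.2.1 (s.2.2 + v), s.2.2 + v)

def mergeSorted (a1 b1 a2 b2 : Int) : List Int :=
  if a2 ≤ b1 + 1 then PySem.List.pyRange a1 (max b1 b2 + 1) 1
  else PySem.List.pyRange a1 (b1 + 1) 1 ++ PySem.List.pyRange a2 (b2 + 1) 1

def mergeTail (a1 b1 a2 b2 : Int) : List Int :=
  if a2 < a1 then mergeSorted a2 b2 a1 b1 else mergeSorted a1 b1 a2 b2

def solve_alt (n : Int) (vet : List Int) : String :=
  let st := (PySem.List.pyRange 0 n 1).foldl (step1 vet) (0, 0, 0, 0, 0)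
  let p := (PySem.List.pyRange (st.1 + 1) n 1).foldl (step2 vet) (0, 0, 0)
  let q := (PySem.List.pyRange (st.1 - 1) (-1) (-1)).foldl (step2 vet) (0, 0, 0)
  let w := PySem.List.pyGetD vet st.1 0
  let out := mergeTail st.2.2.2.2 st.2.2.2.1 (p.2.1 + q.2.1 + w) (p.1 + q.1 + w)
  PySem.Int.toStr (PySem.List.len out) ++ "\n" ++ PySem.Str.join " " (out.map PySem.Int.toStr)

-- ===== PRECONDITION & SPEC =====
-- Pre_ excludes exactly the inputs where the Python A raises IndexError: an empty vet
-- (vet[flag] is read unconditionally) and n > len(vet) (the first loop reads vet[i] for i < n).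
def Pre_solve (n : Int) (vet : List Int) : Prop := vet ≠ [] ∧ n ≤ (vet.length : Int)
instance (n : Int) (vet : List Int) : Decidable (Pre_solve n vet) := by unfold Pre_solve; infer_instance
def pvWitness_solve : Int × List Int := (3, [1, 0, -1])
def Spec_solve (n : Int) (vet : List Int) (out : String) : Prop := out = solve_alt n vet
instance (n : Int) (vet : List Int) (out : String) : Decidable (Spec_solve n vet out) := by unfold Spec_solve; infer_instance

-- ===== CLAIM (what is proved, stated in full; the proofs are below) =====
def Claim_equal_solve : Prop := ∀ (n : Int) (vet : List Int), Dom_solve n vet → Pre_solve n vet → Spec_solve n vet (solve n vet)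

-- ===== LEMMAS AND PROOFS =====
lemma stepA1_eq (vet : List Int) :
    (fun (s : Int × Int × Int × Int × Int) (i : Int) =>
      let (flag, l, r, ml, mr) := s
      if PySem.List.pyGetD vet i 0 = 1 ∨ PySem.List.pyGetD vet i 0 = -1 then
        let l := l + PySem.List.pyGetD vet i 0
        let l := max l 0
        let ml := max ml l
        let r := r + PySem.List.pyGetD vet i 0
        let r := min r 0
        let mr := min mr r
        (flag, l, r, ml, mr)
      else
        (i, 0, 0, ml, mr)) = step1 vet := by
  funext s i
  obtain ⟨f, l, r, ml, mr⟩ := s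
  rfl

lemma stepA2_eq (vet : List Int) :
    (fun (s : Int × Int × Int) (i : Int) =>
      let z := s.2.2 + PySem.List.pyGetD vet i 0
      (max s.1 z, min s.2.1 z, z)) = step2 vet := by
  funext s i; rfl

lemma inv5 (vet : List Int) (l : List Int) (st : Int × Int × Int × Int × Int)
    (h1 : st.2.2.2.2 ≤ 0) (h2 : 0 ≤ st.2.2.2.1) :
    (l.foldl (step1 vet) st).2.2.2.2 ≤ 0 ∧ 0 ≤ (l.foldl (step1 vet) st).2.2.2.1 := by
  induction l generalizing st with
  | nil => exact ⟨h1, h2⟩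
  | cons a t ih =>
      simp only [List.foldl_cons]
      apply ih
      · simp only [step1]
        split
        · exact le_trans (min_le_left _ _) h1
        · exact h1
      · simp only [step1]
        split
        · exact le_trans h2 (le_max_left _ _)
        · exact h2

lemma inv3 (vet : List Int) (l : List Int) (s : Int × Int × Int)
    (h1 : s.2.1 ≤ 0) (h2 : 0 ≤ s.1) :
    (l.foldl (step2 vet) s).2.1 ≤ 0 ∧ 0 ≤ (l.foldl (step2 vet) s).1 := by
  induction l generalizing s with
  | nil => exact ⟨h1, h2⟩
  | cons a t ih =>
      simp only [List.foldl_cons]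
      apply ih
      · exact le_trans (min_le_left _ _) h1
      · exact le_trans h2 (le_max_left _ _)

lemma pyRange_map_add (a b v : Int) :
    (PySem.List.pyRange a b 1).map (fun i => i + v) = PySem.List.pyRange (a + v) (b + v) 1 := by
  rw [PySem.List.pyRange_one, PySem.List.pyRange_one, List.map_map]
  have : b + v - (a + v) = b - a := by ring
  rw [this]
  apply List.map_congr_left
  intro k _
  simp; ring

lemma mem_foldl_add {s : PySem.Set Int} {l : List Int} {x : Int} :
    x ∈ l.foldl PySem.Set.add s ↔ x ∈ s ∨ x ∈ l := by
  induction l generalizing s with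
  | nil => simp
  | cons a t ih =>
      simp only [List.foldl_cons, ih, PySem.Set.mem_add, List.mem_cons]
      tauto

lemma nodup_foldl_add {s : PySem.Set Int} {l : List Int} (h : s.Nodup) :
    (l.foldl PySem.Set.add s).Nodup := by
  induction l generalizing s with
  | nil => exact h
  | cons a t ih => exact ih (PySem.Set.nodup_add _ _ h)

lemma nodup_mergeSorted (a1 b1 a2 b2 : Int) : (mergeSorted a1 b1 a2 b2).Nodup := by
  unfold mergeSorted
  split
  · exact PySem.List.nodup_pyRange_one ..
  · refine List.Nodup.append (PySem.List.nodup_pyRange_one ..) (PySem.List.nodup_pyRange_one ..) ?_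
    intro x hx hy
    rw [PySem.List.mem_pyRange_one] at hx
    rw [PySem.List.mem_pyRange_one] at hy
    omega

lemma pairwise_mergeSorted (a1 b1 a2 b2 : Int) :
    (mergeSorted a1 b1 a2 b2).Pairwise (· < ·) := by
  unfold mergeSorted
  split
  · exact PySem.List.pairwise_lt_pyRange_one ..
  · refine List.pairwise_append.mpr
      ⟨PySem.List.pairwise_lt_pyRange_one .., PySem.List.pairwise_lt_pyRange_one .., ?_⟩
    intro x hx y hy
    rw [PySem.List.mem_pyRange_one] at hx
    rw [PySem.List.mem_pyRange_one] at hy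
    omega

lemma mem_mergeSorted (a1 b1 a2 b2 x : Int) (h : a1 ≤ a2) (h1 : a1 ≤ b1) (h2 : a2 ≤ b2) :
    x ∈ mergeSorted a1 b1 a2 b2 ↔ (a1 ≤ x ∧ x ≤ b1) ∨ (a2 ≤ x ∧ x ≤ b2) := by
  unfold mergeSorted
  split <;> simp only [List.mem_append, PySem.List.mem_pyRange_one] <;> omega

lemma tail_eq (ml mr x1 y1 x2 y2 w : Int) (hml : 0 ≤ ml) (hmr : mr ≤ 0)
    (hx1 : 0 ≤ x1) (hy1 : y1 ≤ 0) (hx2 : 0 ≤ x2) (hy2 : y2 ≤ 0) :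
    PySem.List.sorted
      ((PySem.List.pyRange (min (y1 + y2) (min y1 y2)) (max (x2 + x1) (max x1 x2) + 1) 1).foldl
         (fun s i => PySem.Set.add s (i + w))
         ((PySem.List.pyRange mr (ml + 1) 1).foldl PySem.Set.add PySem.Set.empty))
      (fun x => x) false
    = mergeTail mr ml (y1 + y2 + w) (x1 + x2 + w) := by
  have hlo : min (y1 + y2) (min y1 y2) = y1 + y2 := by omega
  have hhi : max (x2 + x1) (max x1 x2) = x1 + x2 := by omega
  rw [hlo, hhi]
  have hmap : ∀ (l : List Int) (s : PySem.Set Int),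
      l.foldl (fun s i => PySem.Set.add s (i + w)) s
        = (l.map (fun i => i + w)).foldl PySem.Set.add s := by
    intro l s; rw [List.foldl_map]
  rw [hmap, pyRange_map_add]
  have haux : x1 + x2 + 1 + w = x1 + x2 + w + 1 := by ring
  rw [haux]
  have hnodupA : ((PySem.List.pyRange (y1 + y2 + w) (x1 + x2 + w + 1) 1).foldl PySem.Set.add
      ((PySem.List.pyRange mr (ml + 1) 1).foldl PySem.Set.add PySem.Set.empty)).Nodup :=
    nodup_foldl_add (nodup_foldl_add List.nodup_nil)
  apply PySem.List.sorted_eq_of_perm_of_pairwise_lt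
  · unfold mergeTail
    split
    · rw [List.perm_ext_iff_of_nodup (nodup_mergeSorted ..) hnodupA]
      intro x
      rw [mem_mergeSorted _ _ _ _ _ (by omega) (by omega) (by omega), mem_foldl_add, mem_foldl_add,
        PySem.List.mem_pyRange_one, PySem.List.mem_pyRange_one]
      simp only [PySem.Set.empty, List.not_mem_nil, false_or]
      omega
    · rw [List.perm_ext_iff_of_nodup (nodup_mergeSorted ..) hnodupA]
      intro x
      rw [mem_mergeSorted _ _ _ _ _ (by omega) (by omega) (by omega), mem_foldl_add, mem_foldl_add,
        PySem.List.mem_pyRange_one, PySem.List.mem_pyRange_one]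
      simp only [PySem.Set.empty, List.not_mem_nil, false_or]
      omega
  · unfold mergeTail
    split
    · exact pairwise_mergeSorted ..
    · exact pairwise_mergeSorted ..

lemma ports_eq (n : Int) (vet : List Int) : solve n vet = solve_alt n vet := by
  simp only [solve, solve_alt, stepA1_eq, stepA2_eq]
  have h5 := inv5 vet (PySem.List.pyRange 0 n 1) (0, 0, 0, 0, 0) (by norm_num) (by norm_num)
  generalize hst : (PySem.List.pyRange 0 n 1).foldl (step1 vet) (0, 0, 0, 0, 0) = st at *
  have hp := inv3 vet (PySem.List.pyRange (st.1 + 1) n 1) (0, 0, 0) (by norm_num) (by norm_num)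
  have hq := inv3 vet (PySem.List.pyRange (st.1 - 1) (-1) (-1)) (0, 0, 0) (by norm_num) (by norm_num)
  generalize hpp : (PySem.List.pyRange (st.1 + 1) n 1).foldl (step2 vet) (0, 0, 0) = p at *
  generalize hqq : (PySem.List.pyRange (st.1 - 1) (-1) (-1)).foldl (step2 vet) (0, 0, 0) = q at *
  rw [tail_eq st.2.2.2.1 st.2.2.2.2 p.1 p.2.1 q.1 q.2.1 (PySem.List.pyGetD vet st.1 0)
    h5.2 h5.1 hp.2 hp.1 hq.2 hq.1]

-- ===== VERDICT (by name: the statement is the Claim_ definition above) =====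
theorem solve_spec : Claim_equal_solve := by
  intro n vet _ _
  exact ports_eq n vet
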